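-- pv_equiv track=rewrite | github.com/ssarunic/thestill | scripts/migrate_episode_facts_to_slugs.py | is_uuid_filename
-- ===== SOURCE A (Python) =====
-- def is_uuid_filename(filename: str) -> bool:
--     """Check if filename looks like a UUID (36 chars with hyphens)."""
--     # UUID format: xxxxxxxx-xxxx-xxxx-xxxx-xxxxxxxxxxxx.facts.md
--     name = filename.replace(".facts.md", "")
--     if len(name) != 36:
--         return False
--     parts = name.split("-")
--     if len(parts) != 5:
--         return False
--     expected_lengths = [8, 4, 4, 4, 12]
--     return all(len(p) == l for p, l in zip(parts, expected_lengths))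
-- ===== SOURCE B (Python) =====
-- def is_uuid_filename(filename: str) -> bool:
--     """Check if filename looks like a UUID (36 chars with hyphens)."""
--     # Compare the hyphen mask of the name against the fixed UUID mask:
--     # hyphens exactly at positions 8, 13, 18, 23 of a 36-char name.
--     name = filename.replace(".facts.md", "")
--     return [c == "-" for c in name] == [i in (8, 13, 18, 23) for i in range(36)]
-- ===== Notes on version B (the rewrite author's own statement) =====
-- stated objective: idiomatic
-- what changed: Replaces the split-on-hyphen / per-segment length check with a single positional comparison: the name's hyphen mask is compared against the fixed UUID mask (hyphens exactly at indices 8,13,18,23 of a 36-char name).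
import Mathlib
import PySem

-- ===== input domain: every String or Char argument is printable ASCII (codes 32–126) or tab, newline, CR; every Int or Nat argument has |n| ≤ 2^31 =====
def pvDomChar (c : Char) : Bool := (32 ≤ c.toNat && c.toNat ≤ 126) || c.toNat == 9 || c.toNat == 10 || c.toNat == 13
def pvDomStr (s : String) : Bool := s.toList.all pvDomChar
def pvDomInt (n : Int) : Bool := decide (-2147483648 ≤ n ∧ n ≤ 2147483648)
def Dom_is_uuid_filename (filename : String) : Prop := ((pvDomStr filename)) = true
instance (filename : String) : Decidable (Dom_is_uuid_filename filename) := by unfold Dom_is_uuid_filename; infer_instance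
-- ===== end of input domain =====

-- B replaces A's split-on-hyphen and per-segment length loop by a single positional
-- comparison of the name's hyphen mask against the fixed UUID mask (idiomatic, same cost).

-- ===== PORT A =====
def is_uuid_filename (filename : String) : Bool :=
  let name := PySem.Str.replace filename ".facts.md" ""
  if PySem.Str.len name ≠ 36 then false
  else
    let parts := PySem.Chars.splitOn name.toList ['-']
    if parts.length ≠ 5 then false
    else
      let expected_lengths : List Int := [8, 4, 4, 4, 12]
      (parts.zip expected_lengths).all (fun pl => PySem.Chars.len pl.1 == pl.2)

-- ===== PORT B =====
def is_uuid_filename_alt (filename : String) : Bool :=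
  let name := PySem.Str.replace filename ".facts.md" ""
  name.toList.map (fun c => c == '-')
    == (PySem.List.pyRange 0 36 1).map (fun i => i == 8 || i == 13 || i == 18 || i == 23)

-- ===== PRECONDITION & SPEC =====
def Spec_is_uuid_filename (filename : String) (out : Bool) : Prop := out = is_uuid_filename_alt filename
instance (filename : String) (out : Bool) : Decidable (Spec_is_uuid_filename filename out) := by unfold Spec_is_uuid_filename; infer_instance

-- ===== CLAIM (what is proved, stated in full; the proofs are below) =====
def Claim_equal_is_uuid_filename : Prop := ∀ (filename : String), Dom_is_uuid_filename filename → Spec_is_uuid_filename filename (is_uuid_filename filename)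

-- ===== LEMMAS AND PROOFS =====

-- Model of str.split("-"): the list of hyphen-free runs.
def pvParts : List Char → List (List Char)
  | [] => [[]]
  | c :: rest =>
    if c = '-' then [] :: pvParts rest
    else match pvParts rest with
      | [] => [[c]]
      | p :: ps => (c :: p) :: ps

-- Run lengths read off a hyphen mask.
def pvLens : List Bool → List Nat
  | [] => [0]
  | true :: m => 0 :: pvLens m
  | false :: m => match pvLens m with
    | [] => [1]
    | k :: t => (k + 1) :: t

-- The hyphen mask determined by run lengths.
def pvMaskOf : List Nat → List Bool
  | [] => []
  | [n] => List.replicate n false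
  | n :: ns => List.replicate n false ++ true :: pvMaskOf ns

theorem pvParts_ne_nil (l : List Char) : pvParts l ≠ [] := by
  cases l with
  | nil => simp [pvParts]
  | cons c rest =>
    simp only [pvParts]
    split <;> simp
    split <;> simp

theorem pvLens_ne_nil (m : List Bool) : pvLens m ≠ [] := by
  cases m with
  | nil => simp [pvLens]
  | cons b rest =>
    cases b <;> simp only [pvLens]
    · split <;> simp
    · simp

theorem pv_splitOn_go (fuel : Nat) : ∀ (l cur : List Char) (acc : List (List Char)),
    l.length < fuel →
    PySem.Chars.splitOn.go ['-'] fuel l cur acc =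
      acc.reverse ++ (match pvParts l with
        | [] => []
        | p :: ps => (cur.reverse ++ p) :: ps) := by
  induction fuel with
  | zero => intro l cur acc h; omega
  | succ f ih =>
    intro l cur acc h
    cases l with
    | nil =>
      simp [PySem.Chars.splitOn.go, pvParts]
    | cons c rest =>
      rw [PySem.Chars.splitOn.go]
      by_cases hc : c = '-'
      · subst hc
        simp only [List.isPrefixOf, beq_self_eq_true, Bool.true_and, if_pos, List.length_cons, List.drop_succ_cons, List.length_nil, List.drop_zero]
        rw [ih rest [] (cur.reverse :: acc) (by simp at h ⊢; omega)]
        have := pvParts_ne_nil rest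
        cases hp : pvParts rest with
        | nil => exact absurd hp this
        | cons p ps => simp [pvParts, hp]
      · have hpre : (['-'].isPrefixOf (c :: rest)) = false := by
          simp [List.isPrefixOf]; exact fun h' => hc h'.symm
        simp only [hpre, Bool.false_eq_true, if_false]
        rw [ih rest (c :: cur) acc (by simp at h ⊢; omega)]
        have := pvParts_ne_nil rest
        cases hp : pvParts rest with
        | nil => exact absurd hp this
        | cons p ps => simp [pvParts, hp, hc]

theorem pv_splitOn_eq (l : List Char) : PySem.Chars.splitOn l ['-'] = pvParts l := by
  unfold PySem.Chars.splitOn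
  rw [pv_splitOn_go (l.length + 1) l [] [] (by omega)]
  have := pvParts_ne_nil l
  cases hp : pvParts l with
  | nil => exact absurd hp this
  | cons p ps => simp

theorem pv_lens_parts (l : List Char) :
    (pvParts l).map List.length = pvLens (l.map (fun c => c == '-')) := by
  induction l with
  | nil => simp [pvParts, pvLens]
  | cons c rest ih =>
    by_cases hc : c = '-'
    · subst hc; simp [pvParts, pvLens, ih]
    · have hb : (c == '-') = false := by simp [hc]
      simp only [pvParts, if_neg hc, List.map_cons, hb, pvLens]
      have := pvParts_ne_nil rest
      cases hp : pvParts rest with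
      | nil => exact absurd hp this
      | cons p ps =>
        rw [hp] at ih
        simp only [List.map_cons] at ih
        simp [← ih]

theorem pv_maskOf_lens (m : List Bool) : pvMaskOf (pvLens m) = m := by
  induction m with
  | nil => simp [pvLens, pvMaskOf]
  | cons b rest ih =>
    cases b
    · simp only [pvLens]
      have := pvLens_ne_nil rest
      cases hp : pvLens rest with
      | nil => exact absurd hp this
      | cons k t =>
        rw [hp] at ih
        cases t with
        | nil => simp only [pvMaskOf, List.replicate] at ih ⊢; simp [ih]
        | cons t0 ts => simp only [pvMaskOf, List.replicate] at ih ⊢; simp [ih]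
    · simp only [pvLens]
      have := pvLens_ne_nil rest
      cases hp : pvLens rest with
      | nil => exact absurd hp this
      | cons k t =>
        rw [hp] at ih
        cases t with
        | nil => simpa [pvMaskOf] using ih
        | cons t0 ts => simpa [pvMaskOf] using ih

-- the fixed UUID hyphen mask
def pvM : List Bool := pvMaskOf [8, 4, 4, 4, 12]

theorem pv_key (m : List Bool) : pvLens m = [8, 4, 4, 4, 12] ↔ m = pvM := by
  constructor
  · intro h; rw [← pv_maskOf_lens m, h]; rfl
  · intro h; subst h; decide

theorem pv_main (cs : List Char) :
    ((if (cs.length : Int) ≠ 36 then false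
      else
        let parts := PySem.Chars.splitOn cs ['-']
        if parts.length ≠ 5 then false
        else (parts.zip ([8, 4, 4, 4, 12] : List Int)).all
          (fun pl => PySem.Chars.len pl.1 == pl.2)) : Bool)
    = (cs.map (fun c => c == '-')
        == (PySem.List.pyRange 0 36 1).map (fun i => i == 8 || i == 13 || i == 18 || i == 23)) := by
  have hM : (PySem.List.pyRange 0 36 1).map
      (fun i => i == 8 || i == 13 || i == 18 || i == 23) = pvM := by decide
  rw [hM, pv_splitOn_eq]
  by_cases hmask : cs.map (fun c => c == '-') = pvM
  · -- masks equal: both sides are true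
    rw [beq_iff_eq.mpr hmask]
    have hlens : pvLens (cs.map (fun c => c == '-')) = [8, 4, 4, 4, 12] :=
      (pv_key _).mpr hmask
    have hmap : (pvParts cs).map List.length = [8, 4, 4, 4, 12] := by
      rw [pv_lens_parts]; exact hlens
    have h36 : cs.length = 36 := by
      have := congrArg List.length hmask
      simpa using this
    rw [if_neg (by simp [h36])]
    have hplen : (pvParts cs).length = 5 := by
      have := congrArg List.length hmap; simpa using this
    rw [if_neg (by omega)]
    obtain ⟨p1, p2, p3, p4, p5, hps⟩ : ∃ p1 p2 p3 p4 p5,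
        pvParts cs = [p1, p2, p3, p4, p5] := by
      rcases hl : pvParts cs with _ | ⟨a, _ | ⟨b, _ | ⟨c, _ | ⟨d, _ | ⟨e, _ | ⟨f, t⟩⟩⟩⟩⟩⟩ <;>
        simp_all
    rw [hps] at hmap
    simp only [List.map_cons, List.map_nil, List.cons.injEq, and_true] at hmap
    obtain ⟨l1, l2, l3, l4, l5⟩ := hmap
    simp [hps, List.zip, List.zipWith, PySem.Chars.len, l1, l2, l3, l4, l5]
  · -- masks differ: both sides are false
    rw [beq_eq_false_iff_ne.mpr hmask]
    have hlens : pvLens (cs.map (fun c => c == '-')) ≠ [8, 4, 4, 4, 12] := by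
      intro h; exact hmask ((pv_key _).mp h)
    split
    · rfl
    rename_i h36
    show (if (pvParts cs).length ≠ 5 then false
          else ((pvParts cs).zip ([8, 4, 4, 4, 12] : List Int)).all
            (fun pl => PySem.Chars.len pl.1 == pl.2)) = false
    split
    · rfl
    rename_i h5
    by_contra hall
    simp only [Bool.not_eq_false] at hall
    apply hlens
    rw [← pv_lens_parts]
    have hplen : (pvParts cs).length = 5 := by omega
    obtain ⟨p1, p2, p3, p4, p5, hps⟩ : ∃ p1 p2 p3 p4 p5,
        pvParts cs = [p1, p2, p3, p4, p5] := by
      rcases hl : pvParts cs with _ | ⟨a, _ | ⟨b, _ | ⟨c, _ | ⟨d, _ | ⟨e, _ | ⟨f, t⟩⟩⟩⟩⟩⟩ <;>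
        simp_all
    rw [hps] at hall ⊢
    simp only [List.zip, List.zipWith, List.all_cons, List.all_nil, Bool.and_true,
      Bool.and_eq_true, beq_iff_eq, PySem.Chars.len] at hall
    obtain ⟨h1, h2, h3, h4, h5⟩ := hall
    simp only [List.map_cons, List.map_nil, List.cons.injEq, and_true]
    refine ⟨by omega, by omega, by omega, by omega, by omega⟩

-- ===== VERDICT (by name: the statement is the Claim_ definition above) =====
theorem is_uuid_filename_spec : Claim_equal_is_uuid_filename := by
  intro filename _
  unfold Spec_is_uuid_filename is_uuid_filename is_uuid_filename_alt
  simp only [PySem.Str.len]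
  exact pv_main (PySem.Str.replace filename ".facts.md" "").toList
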